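-- pv_equiv track=rewrite | github.com/MorganBergen/sandbox | other/main.py | is_function
-- ===== SOURCE A (Python) =====
-- def is_function(A, f):
--
--     temp = set()
--
--     for i, j, in f:
--         if i in temp:
--             return False
--         else:
--             temp.add(i)
--
--     return (temp == A)
-- ===== SOURCE B (Python) =====
-- def is_function(A, f):
--     domain = sorted(i for i, j in f)
--     if any(x == y for x, y in zip(domain, domain[1:])):
--         return False
--     return domain == sorted(A)
-- ===== Notes on version B (the rewrite author's own statement) =====
-- stated objective: alternative
-- what changed: Replaces A's incremental hash-set loop (early-exit membership test, then set equality) with a sort-based algorithm: sort the first coordinates, detect duplicates by scanning adjacent pairs of the sorted list, and decide domain equality by comparing the sorted domain with sorted(A) as lists.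
import Mathlib
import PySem

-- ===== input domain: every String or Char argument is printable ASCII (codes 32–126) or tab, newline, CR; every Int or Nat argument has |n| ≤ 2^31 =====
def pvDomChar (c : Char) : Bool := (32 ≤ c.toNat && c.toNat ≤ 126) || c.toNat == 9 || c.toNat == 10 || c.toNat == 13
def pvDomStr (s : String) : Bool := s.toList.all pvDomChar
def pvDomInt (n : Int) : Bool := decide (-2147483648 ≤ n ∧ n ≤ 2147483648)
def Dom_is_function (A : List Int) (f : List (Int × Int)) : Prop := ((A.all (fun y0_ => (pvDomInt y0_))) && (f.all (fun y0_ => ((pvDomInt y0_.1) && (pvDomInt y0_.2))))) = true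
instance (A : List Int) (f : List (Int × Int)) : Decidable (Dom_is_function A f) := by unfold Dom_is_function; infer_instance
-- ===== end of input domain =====

-- B replaces A's incremental hash-set loop with a sort-based check: sort the first
-- coordinates, scan adjacent pairs for duplicates, then compare with sorted(A) as lists.

-- ===== PORT A =====
-- A's parameter A is a Python set (here: its distinct elements as a list); 'temp == A' is set equality.
def is_function_go (A : List Int) (temp : PySem.Set Int) : List (Int × Int) → Bool
  | [] => PySem.Set.equal temp A
  | (i, _j) :: rest =>
      if PySem.Set.contains temp i then false
      else is_function_go A (PySem.Set.add temp i) rest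

def is_function (A : List Int) (f : List (Int × Int)) : Bool :=
  is_function_go A PySem.Set.empty f

-- ===== PORT B =====
-- domain = sorted(i for i, j in f); domain[1:] is `drop 1`; sorted(A) sorts the set's elements.
def is_function_alt (A : List Int) (f : List (Int × Int)) : Bool :=
  let domain := PySem.List.sorted (f.map (fun ij => ij.1)) (fun x => x) false
  if (domain.zip (domain.drop 1)).any (fun p => p.1 == p.2) then false
  else decide (domain = PySem.List.sorted (PySem.Set.ofList A) (fun x => x) false)

-- ===== PRECONDITION & SPEC =====
def Spec_is_function (A : List Int) (f : List (Int × Int)) (out : Bool) : Prop := out = is_function_alt A f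
instance (A : List Int) (f : List (Int × Int)) (out : Bool) : Decidable (Spec_is_function A f out) := by unfold Spec_is_function; infer_instance

-- ===== CLAIM (what is proved, stated in full; the proofs are below) =====
def Claim_equal_is_function : Prop := ∀ (A : List Int) (f : List (Int × Int)), Dom_is_function A f → Spec_is_function A f (is_function A f)

-- ===== LEMMAS AND PROOFS =====

-- A's loop: true iff the pending first coordinates are distinct, avoid temp, and fill temp up to A.
theorem go_true_iff (A : List Int) (f : List (Int × Int)) (temp : PySem.Set Int) :
    is_function_go A temp f = true ↔
      (f.map (fun ij => ij.1)).Nodup ∧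
      (∀ x ∈ f.map (fun ij => ij.1), x ∉ temp) ∧
      PySem.Set.equal (PySem.Set.update temp (f.map (fun ij => ij.1))) A = true := by
  induction f generalizing temp with
  | nil => simp [is_function_go, PySem.Set.update]
  | cons hd tl ih =>
      obtain ⟨i, j⟩ := hd
      simp only [is_function_go, List.map_cons, List.nodup_cons, List.mem_cons,
        PySem.Set.update_cons]
      split
      · rename_i hc
        have hi : i ∈ temp := by simpa using hc
        simp only [Bool.false_eq_true, false_iff]
        rintro ⟨-, hall, -⟩
        exact (hall i (Or.inl rfl)) hi
      · rename_i hc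
        have hi : i ∉ temp := by simpa using hc
        rw [ih]
        constructor
        · rintro ⟨hn, hall, he⟩
          have hmemadd : ∀ x ∈ List.map (fun ij => ij.1) tl, x ∉ temp ∧ x ≠ i := by
            intro x hx
            have hx' := hall x hx
            simp only [PySem.Set.mem_add] at hx'
            exact ⟨fun h => hx' (Or.inl h), fun h => hx' (Or.inr h)⟩
          refine ⟨⟨fun hmem => (hmemadd i hmem).2 rfl, hn⟩, ?_, he⟩
          rintro x (rfl | hx)
          · exact hi
          · exact (hmemadd x hx).1
        · rintro ⟨⟨hni, hn⟩, hall, he⟩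
          refine ⟨hn, fun x hx => ?_, he⟩
          simp only [PySem.Set.mem_add]
          rintro (hxt | rfl)
          · exact (hall x (Or.inr hx)) hxt
          · exact hni hx

theorem a_true_iff (A : List Int) (f : List (Int × Int)) :
    is_function A f = true ↔
      (f.map (fun ij => ij.1)).Nodup ∧
      (∀ x, x ∈ f.map (fun ij => ij.1) ↔ x ∈ A) := by
  unfold is_function
  rw [go_true_iff]
  simp only [PySem.Set.equal_iff]
  constructor
  · rintro ⟨h1, -, h3⟩
    refine ⟨h1, fun x => ?_⟩
    simpa [PySem.Set.mem_update, PySem.Set.empty] using h3 x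
  · rintro ⟨h1, h2⟩
    refine ⟨h1, fun x hx => by simp [PySem.Set.empty], fun x => ?_⟩
    simpa [PySem.Set.mem_update, PySem.Set.empty] using h2 x

-- In a ≤-sorted list, no adjacent pair is equal iff the list has no duplicates.
theorem adj_scan_nodup (p : List Int) (hp : p.Pairwise (· ≤ ·)) :
    (p.zip (p.drop 1)).any (fun q => q.1 == q.2) = false ↔ p.Nodup := by
  induction p with
  | nil => simp
  | cons a t ih =>
      rcases t with _ | ⟨b, t'⟩
      · simp
      · have hp' := List.pairwise_cons.1 hp
        obtain ⟨hab, hpt⟩ := hp'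
        have hbt' := List.pairwise_cons.1 hpt
        simp only [List.drop_one, List.tail_cons] at ih ⊢
        simp only [List.zip_cons_cons, List.any_cons, Bool.or_eq_false_iff]
        rw [ih hpt]
        simp only [beq_eq_false_iff_ne, ne_eq, List.nodup_cons, List.mem_cons]
        constructor
        · rintro ⟨hne, hrest⟩
          refine ⟨?_, hrest⟩
          rintro (rfl | hat')
          · exact hne rfl
          · have h1 : a ≤ b := hab b (List.mem_cons_self ..)
            have h2 : b ≤ a := hbt'.1 a hat'
            exact hne (le_antisymm h1 h2)
        · rintro ⟨hna, hrest⟩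
          exact ⟨fun h => hna (Or.inl h), hrest⟩

theorem alt_true_iff (A : List Int) (f : List (Int × Int)) :
    is_function_alt A f = true ↔
      (f.map (fun ij => ij.1)).Nodup ∧
      (∀ x, x ∈ f.map (fun ij => ij.1) ↔ x ∈ A) := by
  unfold is_function_alt
  set dl := f.map (fun ij => ij.1) with hdl
  have hperm : (PySem.List.sorted dl (fun x => x) false).Perm dl := PySem.List.sorted_perm ..
  have hpair : (PySem.List.sorted dl (fun x => x) false).Pairwise (· ≤ ·) := by
    simpa using PySem.List.sorted_pairwise (xs := dl) (key := fun x => x)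
  simp only
  split
  · rename_i hany
    simp only [Bool.false_eq_true, false_iff]
    rintro ⟨hnd, -⟩
    have hfalse := (adj_scan_nodup _ hpair).2 (hperm.nodup_iff.2 hnd)
    rw [hfalse] at hany
    cases hany
  · rename_i hany
    rw [Bool.not_eq_true] at hany
    have hnds : (PySem.List.sorted dl (fun x => x) false).Nodup :=
      (adj_scan_nodup _ hpair).1 hany
    have hnd : dl.Nodup := hperm.nodup_iff.1 hnds
    have hndA : (PySem.Set.ofList A).Nodup := PySem.Set.nodup_ofList ..
    simp only [decide_eq_true_eq]
    rw [PySem.List.sorted_id_eq_sorted_id_iff_perm]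
    constructor
    · intro hp
      refine ⟨hnd, fun x => ?_⟩
      exact hp.mem_iff.trans (PySem.Set.mem_ofList ..)
    · rintro ⟨-, hmem⟩
      exact (List.perm_ext_iff_of_nodup hnd hndA).2
        (fun x => (hmem x).trans (PySem.Set.mem_ofList ..).symm)

-- ===== VERDICT (by name: the statement is the Claim_ definition above) =====
theorem is_function_spec : Claim_equal_is_function := by
  intro A f _
  unfold Spec_is_function
  rw [Bool.eq_iff_iff, a_true_iff, alt_true_iff]
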